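-- pv_equiv track=rewrite | github.com/hbajohr/megawatt-deutsch | megawatt.py | kombiniere
-- ===== SOURCE A (Python) =====
-- def kombiniere(num, worte):
--     schluss = []
--     if num > 0 and len(worte) >= num:
--         if num == 1:
--             schluss = schluss + [[worte[0]]]
--         else:
--             schluss = schluss + [[worte[0]] +
--                     c for c in kombiniere(num - 1, worte[1:])]
--         schluss = schluss + kombiniere(num, worte[1:])
--     return schluss
-- ===== SOURCE B (Python) =====
-- def kombiniere(num, worte):
--     if num <= 0 or len(worte) < num:
--         return []
--     partials = [(i, [w]) for i, w in enumerate(worte)]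
--     for _ in range(num - 1):
--         partials = [(j, c + [worte[j]])
--                     for (i, c) in partials
--                     for j in range(i + 1, len(worte))]
--     return [c for (_, c) in partials]
-- ===== Notes on version B (the rewrite author's own statement) =====
-- stated objective: alternative
-- what changed: Replaces A's double recursion (take-head branch plus drop-head branch, re-slicing the list at every call) by a single iterative loop that level-extends a list of (last index, partial combination) pairs num-1 times, preserving the lexicographic-by-index output order.
import Mathlib
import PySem

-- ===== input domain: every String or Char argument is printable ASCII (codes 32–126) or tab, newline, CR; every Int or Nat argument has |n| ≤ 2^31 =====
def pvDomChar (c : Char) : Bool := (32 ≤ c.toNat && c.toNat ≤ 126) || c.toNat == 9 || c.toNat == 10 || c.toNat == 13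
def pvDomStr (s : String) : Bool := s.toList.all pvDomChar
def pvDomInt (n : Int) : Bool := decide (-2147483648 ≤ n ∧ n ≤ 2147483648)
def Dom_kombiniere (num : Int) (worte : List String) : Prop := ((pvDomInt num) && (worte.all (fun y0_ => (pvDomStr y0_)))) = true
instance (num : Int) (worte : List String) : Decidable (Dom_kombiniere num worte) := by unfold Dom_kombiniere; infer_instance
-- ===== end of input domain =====

-- B replaces A's double recursion by one iterative level-extension loop over (last index, combination) pairs (alternative decomposition, same output order).

-- ===== PORT A =====
-- literal port of A's recursion; worte[1:] is ported as `rest` after the match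
-- (exact: for a nonempty list, xs[1:] is its tail), worte[0] as the matched head
-- (A only reads it under the guard num ≥ 1 ∧ len ≥ num, so worte is nonempty there).
def kombiniere (num : Int) (worte : List String) : List (List String) :=
  match worte with
  | [] => []  -- guard num > 0 ∧ len(worte) ≥ num is false for the empty list
  | w :: rest =>
    if num > 0 ∧ num ≤ ((w :: rest).length : Int) then
      (if num = 1 then [[w]]
       else (kombiniere (num - 1) rest).map (fun c => [w] ++ c))
      ++ kombiniere num rest
    else []

-- ===== PORT B =====
-- one round of B's loop body: the comprehension
-- [(j, c + [worte[j]]) for (i, c) in partials for j in range(i + 1, len(worte))]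
def pvStep (worte : List String) (ps : List (Int × List String)) : List (Int × List String) :=
  ps.flatMap (fun p =>
    (PySem.List.pyRange (p.1 + 1) (worte.length : Int) 1).map
      (fun j => (j, p.2 ++ [PySem.List.pyGetD worte j ""])))

def kombiniere_alt (num : Int) (worte : List String) : List (List String) :=
  if num ≤ 0 ∨ (worte.length : Int) < num then []
  else
    let init := (PySem.List.enumerate worte).map (fun p => (p.1, [p.2]))
    let final := (PySem.List.pyRange 0 (num - 1) 1).foldl
      (fun ps _ => pvStep worte ps) init
    final.map (·.2)

-- ===== PRECONDITION & SPEC =====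
def Spec_kombiniere (num : Int) (worte : List String) (out : List (List String)) : Prop := out = kombiniere_alt num worte
instance (num : Int) (worte : List String) (out : List (List String)) : Decidable (Spec_kombiniere num worte out) := by unfold Spec_kombiniere; infer_instance

-- ===== CLAIM (what is proved, stated in full; the proofs are below) =====
def Claim_equal_kombiniere : Prop := ∀ (num : Int) (worte : List String), Dom_kombiniere num worte → Spec_kombiniere num worte (kombiniere num worte)

-- ===== LEMMAS AND PROOFS =====

-- reference function: combN k l = the k-element combinations of l in A's order
def combN : Nat → List String → List (List String)
  | 0, _ => [[]]
  | _ + 1, [] => []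
  | k + 1, w :: rest => (combN k rest).map (fun c => w :: c) ++ combN (k + 1) rest

-- (k+1)-element combinations of l (a suffix of the full list starting at absolute
-- position off), each paired with the absolute index of its last element
def pairsN : Nat → Nat → List String → List (Int × List String)
  | _, _, [] => []
  | 0, off, w :: rest => ((off : Int), [w]) :: pairsN 0 (off + 1) rest
  | k + 1, off, w :: rest =>
      (pairsN k (off + 1) rest).map (fun p => (p.1, w :: p.2)) ++ pairsN (k + 1) (off + 1) rest

theorem combN_nil_of_lt : ∀ (l : List String) (k : Nat), l.length < k → combN k l = [] := by
  intro l
  induction l with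
  | nil =>
    intro k hk
    cases k with
    | zero => omega
    | succ k => simp [combN]
  | cons w rest ih =>
    intro k hk
    cases k with
    | zero => omega
    | succ k =>
      simp only [combN]
      rw [ih k (by simp at hk; omega), ih (k + 1) (by simp at hk; omega)]
      simp

theorem kombiniere_eq_combN : ∀ (worte : List String) (num : Int),
    kombiniere num worte = if 0 < num then combN num.toNat worte else [] := by
  intro worte
  induction worte with
  | nil =>
    intro num
    by_cases h : 0 < num
    · rw [if_pos h, combN_nil_of_lt [] num.toNat (by simp; omega)]; rfl
    · rw [if_neg h]; rfl
  | cons w rest ih =>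
    intro num
    rw [kombiniere]
    by_cases hg : num > 0 ∧ num ≤ ((w :: rest).length : Int)
    · rw [if_pos hg, if_pos hg.1]
      have hnum : num.toNat = (num.toNat - 1) + 1 := by omega
      rw [hnum, combN]
      by_cases h1 : num = 1
      · subst h1
        rw [if_pos rfl, ih 1]
        norm_num [combN]
      · rw [if_neg h1, ih (num - 1), ih num,
          if_pos (by omega : (0:Int) < num - 1), if_pos hg.1]
        have h2 : (num - 1).toNat = num.toNat - 1 := by omega
        rw [h2, hnum]
        simp
    · rw [if_neg hg]
      by_cases h : 0 < num
      · rw [if_pos h, combN_nil_of_lt _ num.toNat (by simp at hg ⊢; omega)]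
      · rw [if_neg h]

theorem pairsN_zero_eq (worte : List String) : ∀ (l : List String) (off : Nat),
    l = worte.drop off →
    pairsN 0 off l =
      (PySem.List.pyRange (off : Int) (worte.length : Int) 1).map
        (fun j => (j, [PySem.List.pyGetD worte j ""])) := by
  intro l
  induction l with
  | nil =>
    intro off h
    have hlen : worte.length ≤ off := by
      have := congrArg List.length h; simp at this; omega
    rw [PySem.List.pyRange_one_eq_nil (by exact_mod_cast hlen)]
    rfl
  | cons w rest ih =>
    intro off h
    have hlt : off < worte.length := by
      have := congrArg List.length h; simp at this; omega
    have hget : worte[off]? = some w := by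
      have h0 : (worte.drop off)[0]? = some w := by rw [← h]; rfl
      simpa using h0
    have hw : PySem.List.pyGetD worte (off : Int) "" = w := by
      rw [PySem.List.pyGetD_natCast]
      simp [List.getD_eq_getElem?_getD, hget]
    have hrest : rest = worte.drop (off + 1) := by
      rw [← List.tail_drop, ← h, List.tail_cons]
    have hcast : ((off : Int) + 1) = ((off + 1 : Nat) : Int) := by push_cast; ring
    simp only [pairsN]
    rw [PySem.List.pyRange_one_cons (by exact_mod_cast hlt), List.map_cons, hw, hcast,
      ih (off + 1) hrest]

theorem pvStep_cons (worte : List String) (p : Int × List String) (ps : List (Int × List String)) :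
    pvStep worte (p :: ps) =
      (PySem.List.pyRange (p.1 + 1) (worte.length : Int) 1).map
        (fun j => (j, p.2 ++ [PySem.List.pyGetD worte j ""])) ++ pvStep worte ps := by
  simp [pvStep]

theorem pvStep_append (worte : List String) (a b : List (Int × List String)) :
    pvStep worte (a ++ b) = pvStep worte a ++ pvStep worte b := by
  simp [pvStep]

theorem pvStep_map_cons (worte : List String) (w : String) (ps : List (Int × List String)) :
    pvStep worte (ps.map (fun p => (p.1, w :: p.2))) =
      (pvStep worte ps).map (fun p => (p.1, w :: p.2)) := by
  simp only [pvStep, List.flatMap_map, List.map_flatMap]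
  congr 1
  funext p
  simp [List.map_map, Function.comp_def]

theorem pvStep_pairsN (worte : List String) : ∀ (l : List String) (k off : Nat),
    l = worte.drop off → pvStep worte (pairsN k off l) = pairsN (k + 1) off l := by
  intro l
  induction l with
  | nil => intro k off _; cases k <;> rfl
  | cons w rest ih =>
    intro k off h
    have hrest : rest = worte.drop (off + 1) := by
      rw [← List.tail_drop, ← h, List.tail_cons]
    have hcast : ((off : Int) + 1) = ((off + 1 : Nat) : Int) := by push_cast; ring
    cases k with
    | zero =>
      simp only [pairsN]
      rw [pvStep_cons, ih 0 (off + 1) hrest]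
      congr 1
      rw [pairsN_zero_eq worte rest (off + 1) hrest, List.map_map]
      simp only [hcast]
      rfl
    | succ k =>
      simp only [pairsN]
      rw [pvStep_append, pvStep_map_cons, ih k (off + 1) hrest, ih (k + 1) (off + 1) hrest]

theorem enumerate_map_eq_pairsN : ∀ (l : List String) (off : Nat),
    (PySem.List.enumerate l (off : Int)).map (fun p => (p.1, [p.2])) = pairsN 0 off l := by
  intro l
  induction l with
  | nil => intro off; simp [PySem.List.enumerate_nil, pairsN]
  | cons w rest ih =>
    intro off
    rw [PySem.List.enumerate_cons]
    simp only [List.map_cons, pairsN]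
    rw [show ((off : Int) + 1) = ((off + 1 : Nat) : Int) by push_cast; ring, ih (off + 1)]

theorem fold_pvStep (worte : List String) : ∀ (t : Nat),
    (List.range t).foldl (fun ps _ => pvStep worte ps) (pairsN 0 0 worte) = pairsN t 0 worte := by
  intro t
  induction t with
  | zero => rfl
  | succ t ih =>
    rw [List.range_succ, List.foldl_append, ih]
    exact pvStep_pairsN worte worte t 0 (by simp)

theorem pairsN_map_snd : ∀ (l : List String) (k off : Nat),
    (pairsN k off l).map (·.2) = combN (k + 1) l := by
  intro l
  induction l with
  | nil => intro k off; cases k <;> rfl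
  | cons w rest ih =>
    intro k off
    cases k with
    | zero => simp [pairsN, combN, ih 0 (off + 1)]
    | succ k =>
      simp only [pairsN, combN, List.map_append, List.map_map]
      rw [show ((fun p : Int × List String => p.2) ∘ fun p : Int × List String => (p.1, w :: p.2)) =
            (fun c => w :: c) ∘ (fun p : Int × List String => p.2) from rfl,
          ← List.map_map, ih k (off + 1), ih (k + 1) (off + 1)]

theorem kombiniere_alt_eq_combN (num : Int) (worte : List String) :
    kombiniere_alt num worte = if 0 < num then combN num.toNat worte else [] := by
  unfold kombiniere_alt
  by_cases hg : num ≤ 0 ∨ (worte.length : Int) < num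
  · rw [if_pos hg]
    rcases hg with h | h
    · rw [if_neg (by omega)]
    · by_cases h0 : 0 < num
      · rw [if_pos h0, combN_nil_of_lt worte num.toNat (by omega)]
      · rw [if_neg h0]
  · rw [if_neg hg]
    rcases not_or.mp hg with ⟨hn0, hnlt⟩
    have h0 : 0 < num := by omega
    rw [if_pos h0]
    simp only
    rw [show (PySem.List.enumerate worte).map (fun p => (p.1, [p.2])) = pairsN 0 0 worte from by
          simpa using enumerate_map_eq_pairsN worte 0,
        PySem.List.pyRange_one]
    simp only [List.foldl_map]
    rw [fold_pvStep worte, pairsN_map_snd]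
    congr 1
    omega

-- ===== VERDICT (by name: the statement is the Claim_ definition above) =====
theorem kombiniere_spec : Claim_equal_kombiniere := by
  intro num worte _
  unfold Spec_kombiniere
  rw [kombiniere_eq_combN, kombiniere_alt_eq_combN]
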